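-- pv_equiv track=rewrite | github.com/Kar0lu/PRM1T2023 | search_algorythms.py | backwards_search
-- ===== SOURCE A (Python) =====
-- def backwards_search(visited):
--     # visited - stack of visited nodes
--     # bp (backwards_path) - array with path from node that we were looking for to base node of graph
--
--     finish = visited[0][1]
--     next = visited[-1][0]
--     bp = [visited[-1][1], next]
--
--     for x in visited[::-1]:
--         if(x[1] == next):
--             next = x[0]
--             bp.append(next)
--             if(next == finish):
--                 break
--
--     return bp
-- ===== SOURCE B (Python) =====
-- def backwards_search(visited):
--     # Same result via a node -> [(index, parent), ...] occurrence map (newest first),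
--     # following the parent chain with a shrinking index bound instead of rescanning.
--     finish = visited[0][1]
--     cur = visited[-1][0]
--     bp = [visited[-1][1], cur]
--     occ = {}
--     for i, (p, c) in enumerate(visited):
--         occ[c] = [(i, p)] + occ.get(c, [])
--     bound = len(visited)
--     while True:
--         hits = [e for e in occ.get(cur, []) if e[0] < bound]
--         if not hits:
--             break
--         j, p = hits[0]
--         bp.append(p)
--         if p == finish:
--             break
--         cur = p
--         bound = j
--     return bp
-- ===== Notes on version B (the rewrite author's own statement) =====
-- stated objective: alternative
-- what changed: B precomputes a dict mapping each node to its (index, parent) occurrences (newest first) and follows the parent chain through that index with a shrinking bound, instead of A's single pass over the reversed list with a break flag.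
import Mathlib
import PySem

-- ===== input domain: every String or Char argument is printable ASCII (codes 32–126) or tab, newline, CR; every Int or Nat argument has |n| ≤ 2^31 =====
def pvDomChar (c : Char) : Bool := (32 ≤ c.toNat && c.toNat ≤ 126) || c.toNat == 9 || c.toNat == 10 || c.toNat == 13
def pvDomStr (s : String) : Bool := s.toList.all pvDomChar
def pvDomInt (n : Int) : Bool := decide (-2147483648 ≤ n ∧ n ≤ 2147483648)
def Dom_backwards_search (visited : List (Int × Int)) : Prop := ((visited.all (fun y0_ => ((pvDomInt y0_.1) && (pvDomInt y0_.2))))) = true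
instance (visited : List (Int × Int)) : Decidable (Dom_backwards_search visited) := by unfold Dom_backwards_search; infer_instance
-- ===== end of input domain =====

-- B rebuilds the backward path via a node→occurrences dict and a shrinking index bound
-- instead of A's single scan of the reversed list; alternative structure, same values.

-- ===== PORT A =====
-- one loop step of A's 'for x in visited[::-1]': state (next, bp, done-flag from the break)
def pvAstep (finish : Int) (st : Int × List Int × Bool) (x : Int × Int) : Int × List Int × Bool :=
  if st.2.2 then st
  else if x.2 = st.1 then
    (x.1, st.2.1 ++ [x.1], decide (x.1 = finish))
  else st

def backwards_search (visited : List (Int × Int)) : List Int :=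
  match PySem.List.pyGet? visited 0, PySem.List.pyGet? visited (-1) with
  | some h, some l =>
      -- visited[::-1] is List.reverse (PySem.List.slice?_none_none_neg_one)
      ((visited.reverse).foldl (pvAstep h.2) (l.1, [l.2, l.1], false)).2.1
  | _, _ => []   -- IndexError on empty visited; excluded by Pre_

-- ===== PORT B =====
-- 'for i, (p, c) in enumerate(visited): occ[c] = [(i, p)] + occ.get(c, [])'
-- (enumerate indices are nonnegative ints; ported exactly as a Nat counter)
def pvBuildOcc : List (Int × Int) → Nat → PySem.Dict Int (List (Nat × Int)) → PySem.Dict Int (List (Nat × Int))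
  | [], _, d => d
  | (p, c) :: t, i, d => pvBuildOcc t (i + 1) (d.insert c ((i, p) :: d.getD c []))

-- the 'while True' loop: bound strictly decreases, which is the termination measure
def pvGo (occ : PySem.Dict Int (List (Nat × Int))) (finish : Int)
    (bound : Nat) (cur : Int) (bp : List Int) : List Int :=
  match h : (occ.getD cur []).filter (fun e => decide (e.1 < bound)) with
  | [] => bp
  | (j, p) :: _ =>
      if p = finish then bp ++ [p]
      else pvGo occ finish j p (bp ++ [p])
termination_by bound
decreasing_by
  have hm : (j, p) ∈ (occ.getD cur []).filter (fun e => decide (e.1 < bound)) := by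
    rw [h]; exact List.mem_cons_self
  have := List.of_mem_filter hm
  simpa using this

def backwards_search_alt (visited : List (Int × Int)) : List Int :=
  match PySem.List.pyGet? visited 0 with
  | none => []   -- IndexError on empty visited; excluded by Pre_
  | some h =>
    match PySem.List.pyGet? visited (-1) with
    | none => []
    | some l =>
        pvGo (pvBuildOcc visited 0 PySem.Dict.empty) h.2 visited.length l.1 [l.2, l.1]

-- ===== PRECONDITION & SPEC =====
-- Pre_ excludes only the empty list, on which A raises IndexError (visited[0]).
def Pre_backwards_search (visited : List (Int × Int)) : Prop := visited ≠ []
instance (visited : List (Int × Int)) : Decidable (Pre_backwards_search visited) := by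
  unfold Pre_backwards_search; infer_instance

def pvWitness_backwards_search : (List (Int × Int)) := [(0, 1), (1, 2), (2, 3)]

def Spec_backwards_search (visited : List (Int × Int)) (out : List Int) : Prop := out = backwards_search_alt visited
instance (visited : List (Int × Int)) (out : List Int) : Decidable (Spec_backwards_search visited out) := by unfold Spec_backwards_search; infer_instance

-- ===== CLAIM (what is proved, stated in full; the proofs are below) =====
def Claim_equal_backwards_search : Prop := ∀ (visited : List (Int × Int)), Dom_backwards_search visited → Pre_backwards_search visited → Spec_backwards_search visited (backwards_search visited)

-- ===== LEMMAS AND PROOFS =====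

-- reference chain function both ports are reduced to
def pvChain (finish : Int) : List (Int × Int) → Int → List Int → List Int
  | [], _, bp => bp
  | x :: t, cur, bp =>
      if x.2 = cur then
        (if x.1 = finish then bp ++ [x.1] else pvChain finish t x.1 (bp ++ [x.1]))
      else pvChain finish t cur bp

-- enumerate with a Nat counter (spec-side mirror of pvBuildOcc's traversal)
def pvEnum {α : Type} : List α → Nat → List (Nat × α)
  | [], _ => []
  | x :: t, i => (i, x) :: pvEnum t (i + 1)

def pvOccAll (visited : List (Int × Int)) (c : Int) : List (Nat × Int) :=
  (((pvEnum visited 0).filter (fun e => decide (e.2.2 = c))).map (fun e => (e.1, e.2.1))).reverse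

-- ---- A side ----

lemma foldA_done (f : Int) (l : List (Int × Int)) (c : Int) (bp : List Int) :
    l.foldl (pvAstep f) (c, bp, true) = (c, bp, true) := by
  induction l with
  | nil => rfl
  | cons x t ih => simpa [pvAstep] using ih

lemma foldA_chain (f : Int) (l : List (Int × Int)) :
    ∀ (c : Int) (bp : List Int),
      (l.foldl (pvAstep f) (c, bp, false)).2.1 = pvChain f l c bp := by
  induction l with
  | nil => intro c bp; rfl
  | cons x t ih =>
    intro c bp
    by_cases hx : x.2 = c
    · by_cases hf : x.1 = f
      · simp [pvChain, pvAstep, hx, hf, List.foldl_cons, foldA_done]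
      · simp [pvChain, pvAstep, hx, hf, List.foldl_cons, ih]
    · simp [pvChain, pvAstep, hx, List.foldl_cons, ih]

-- ---- occ characterization ----

lemma buildOcc_getD (c : Int) :
    ∀ (t : List (Int × Int)) (i : Nat) (d : PySem.Dict Int (List (Nat × Int))),
      (pvBuildOcc t i d).getD c [] =
        (((pvEnum t i).filter (fun e => decide (e.2.2 = c))).map (fun e => (e.1, e.2.1))).reverse
          ++ d.getD c [] := by
  intro t
  induction t with
  | nil => intro i d; simp [pvBuildOcc, pvEnum]
  | cons x t ih =>
    intro i d
    obtain ⟨p, cc⟩ := x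
    by_cases hc : cc = c
    · simp [pvBuildOcc, pvEnum, hc, ih, PySem.Dict.getD_insert]
    · simp [pvBuildOcc, pvEnum, hc, ih, PySem.Dict.getD_insert, Ne.symm hc]

lemma occ_getD (visited : List (Int × Int)) (c : Int) :
    (pvBuildOcc visited 0 PySem.Dict.empty).getD c [] = pvOccAll visited c := by
  simp [buildOcc_getD, pvOccAll, PySem.Dict.getD_empty]

-- membership in pvEnum
lemma mem_pvEnum {α : Type} (l : List α) :
    ∀ (i : Nat) (e : Nat × α), e ∈ pvEnum l i ↔ ∃ k, ∃ hk : k < l.length, e = (i + k, l[k]) := by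
  induction l with
  | nil => intro i e; simp [pvEnum]
  | cons x t ih =>
    intro i e
    simp only [pvEnum, List.mem_cons, ih]
    constructor
    · rintro (rfl | ⟨k, hk, rfl⟩)
      · exact ⟨0, by simp, by simp⟩
      · exact ⟨k + 1, by simpa using hk, by simp [Nat.add_assoc]; omega⟩
    · rintro ⟨k, hk, rfl⟩
      cases k with
      | zero => left; simp
      | succ k =>
        right
        exact ⟨k, by simpa using hk, by simp; omega⟩

lemma mem_occAll (visited : List (Int × Int)) (c : Int) (j : Nat) (p : Int) :
    (j, p) ∈ pvOccAll visited c ↔ ∃ hj : j < visited.length, visited[j] = (p, c) := by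
  simp only [pvOccAll, List.mem_reverse, List.mem_map, List.mem_filter]
  constructor
  · rintro ⟨e, ⟨he, hc⟩, heq⟩
    rw [mem_pvEnum] at he
    obtain ⟨k, hk, rfl⟩ := he
    simp only [Nat.zero_add] at heq hc
    injection heq with h1 h2
    subst h1; subst h2
    refine ⟨hk, ?_⟩
    have hc' : visited[k].2 = c := by simpa using hc
    calc visited[k] = (visited[k].1, visited[k].2) := rfl
      _ = (visited[k].1, c) := by rw [hc']
  · rintro ⟨hj, hv⟩
    refine ⟨(j, visited[j]), ⟨?_, ?_⟩, ?_⟩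
    · rw [mem_pvEnum]; exact ⟨j, hj, by simp⟩
    · simp [hv]
    · simp [hv]

lemma pairwise_occAll (visited : List (Int × Int)) (c : Int) :
    (pvOccAll visited c).Pairwise (fun a b => b.1 < a.1) := by
  have henum : ∀ (l : List (Int × Int)) (i : Nat),
      (pvEnum l i).Pairwise (fun a b : Nat × (Int × Int) => a.1 < b.1) := by
    intro l
    induction l with
    | nil => intro i; simp [pvEnum]
    | cons x t ih =>
      intro i
      refine List.Pairwise.cons ?_ (ih (i + 1))
      intro e he
      rw [mem_pvEnum] at he
      obtain ⟨k, hk, rfl⟩ := he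
      simp; omega
  have h1 := List.Pairwise.filter (fun e => decide (e.2.2 = c)) (henum visited 0)
  have h2 : ((((pvEnum visited 0).filter (fun e => decide (e.2.2 = c))).map
      (fun e => (e.1, e.2.1))) : List (Nat × Int)).Pairwise (fun a b => a.1 < b.1) :=
    List.Pairwise.map _ (fun a b hab => hab) h1
  simpa [pvOccAll, List.pairwise_reverse] using h2

-- ---- pvChain helper lemmas ----

lemma chain_no_match (f : Int) (l : List (Int × Int)) (cur : Int) (bp : List Int)
    (h : ∀ x ∈ l, x.2 ≠ cur) : pvChain f l cur bp = bp := by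
  induction l with
  | nil => rfl
  | cons x t ih =>
    have hx := h x List.mem_cons_self
    simp only [pvChain, if_neg hx]
    exact ih (fun y hy => h y (List.mem_cons_of_mem _ hy))

lemma chain_skip (f : Int) (l1 l2 : List (Int × Int)) (cur : Int) (bp : List Int)
    (h : ∀ x ∈ l1, x.2 ≠ cur) : pvChain f (l1 ++ l2) cur bp = pvChain f l2 cur bp := by
  induction l1 with
  | nil => rfl
  | cons x t ih =>
    have hx := h x List.mem_cons_self
    simp only [List.cons_append, pvChain, if_neg hx]
    exact ih (fun y hy => h y (List.mem_cons_of_mem _ hy))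

-- ---- main: pvGo equals pvChain on the reversed prefix ----

lemma go_eq_chain (visited : List (Int × Int)) (f : Int) :
    ∀ (b : Nat), b ≤ visited.length → ∀ (cur : Int) (bp : List Int),
      pvGo (pvBuildOcc visited 0 PySem.Dict.empty) f b cur bp
        = pvChain f ((visited.take b).reverse) cur bp := by
  intro b
  induction b using Nat.strong_induction_on with
  | _ b ih =>
    intro hb cur bp
    rw [pvGo, occ_getD]
    cases h : (pvOccAll visited cur).filter (fun e => decide (e.1 < b)) with
    | nil =>
      -- no occurrence of cur below b: chain returns bp unchanged
      refine (chain_no_match f _ cur bp ?_).symm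
      intro x hx hx2
      rw [List.mem_reverse] at hx
      obtain ⟨k, hk, hget⟩ := List.mem_iff_getElem.mp hx
      have hkb : k < b := by
        have := hk; simp [List.length_take] at this; omega
      have hkn : k < visited.length := lt_of_lt_of_le hkb hb
      have hgv : visited[k] = x := by
        have := hget
        rwa [List.getElem_take] at this
      have hmem : (k, x.1) ∈ pvOccAll visited cur := by
        rw [mem_occAll]
        exact ⟨hkn, by rw [hgv]; exact Prod.ext rfl hx2⟩
      have : (k, x.1) ∈ (pvOccAll visited cur).filter (fun e => decide (e.1 < b)) :=
        List.mem_filter.mpr ⟨hmem, by simpa using hkb⟩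
      rw [h] at this
      exact absurd this (List.not_mem_nil)
    | cons hd rest =>
      obtain ⟨j, p⟩ := hd
      have hmemf : (j, p) ∈ (pvOccAll visited cur).filter (fun e => decide (e.1 < b)) := by
        rw [h]; exact List.mem_cons_self
      have hjb : j < b := by simpa using List.of_mem_filter hmemf
      have hmem : (j, p) ∈ pvOccAll visited cur := List.mem_of_mem_filter hmemf
      obtain ⟨hjn, hvj⟩ := (mem_occAll visited cur j p).mp hmem
      -- maximality of j among indices < b matching cur
      have hmax : ∀ k, j < k → k < b → visited[k]!.2 ≠ cur := by
        intro k hjk hkb hck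
        have hkn : k < visited.length := lt_of_lt_of_le hkb hb
        have hck' : visited[k].2 = cur := by
          have : visited[k]! = visited[k] := getElem!_pos visited k hkn
          rwa [this] at hck
        have hmemk : (k, visited[k].1) ∈ pvOccAll visited cur :=
          (mem_occAll visited cur k visited[k].1).mpr ⟨hkn, Prod.ext rfl hck'⟩
        have hmemkf : (k, visited[k].1) ∈ (pvOccAll visited cur).filter (fun e => decide (e.1 < b)) :=
          List.mem_filter.mpr ⟨hmemk, by simpa using hkb⟩
        rw [h] at hmemkf
        rcases List.mem_cons.mp hmemkf with heq | hrest
        · have : k = j := congrArg Prod.fst heq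
          omega
        · have hpw := (pairwise_occAll visited cur).filter (fun e => decide (e.1 < b))
          rw [h] at hpw
          have := (List.pairwise_cons.mp hpw).1 _ hrest
          simp at this; omega
      -- decompose (take b).reverse around index j
      have hdecomp : (visited.take b).reverse
          = ((visited.take b).drop (j + 1)).reverse ++ visited[j] :: (visited.take j).reverse := by
        have h1 : visited.take b = (visited.take b).take (j + 1) ++ (visited.take b).drop (j + 1) :=
          (List.take_append_drop _ _).symm
        have h2 : (visited.take b).take (j + 1) = visited.take (j + 1) := by
          rw [List.take_take]; congr 1; omega
        have h3 : visited.take (j + 1) = visited.take j ++ [visited[j]] := by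
          rw [List.take_succ]
          congr 1
          simp [List.getElem?_eq_getElem hjn]
        calc (visited.take b).reverse
            = ((visited.take j ++ [visited[j]]) ++ (visited.take b).drop (j + 1)).reverse := by
              rw [← h3, ← h2, ← h1]
          _ = ((visited.take b).drop (j + 1)).reverse ++ visited[j] :: (visited.take j).reverse := by
              simp
      rw [hdecomp, chain_skip]
      · -- head element matches cur
        have hvj2 : (visited[j] : Int × Int).2 = cur := by rw [hvj]
        have hvj1 : (visited[j] : Int × Int).1 = p := by rw [hvj]
        simp only [pvChain, if_pos hvj2, hvj1]
        by_cases hp : p = f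
        · simp [hp]
        · simp only [if_neg hp]
          exact ih j hjb (le_trans (le_of_lt hjb) hb) p (bp ++ [p])
      · -- the dropped segment (indices j+1..b-1) has no match
        intro x hx hx2
        rw [List.mem_reverse] at hx
        obtain ⟨m, hm, hget⟩ := List.mem_iff_getElem.mp hx
        have hlen : (visited.take b).length = b := by simp [List.length_take]; omega
        have hmlt : j + 1 + m < b := by
          simp [List.length_drop, hlen] at hm; omega
        have hk : j + 1 + m < visited.length := lt_of_lt_of_le hmlt hb
        have hgv : visited[j + 1 + m] = x := by
          have := hget
          rw [List.getElem_drop, List.getElem_take] at this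
          exact this
        have := hmax (j + 1 + m) (by omega) hmlt
        rw [getElem!_pos visited _ hk, hgv] at this
        exact this hx2

-- ===== VERDICT (by name: the statement is the Claim_ definition above) =====
theorem backwards_search_spec : Claim_equal_backwards_search := by
  intro visited _ hpre
  unfold Spec_backwards_search backwards_search backwards_search_alt
  obtain ⟨x, t, rfl⟩ := List.exists_cons_of_ne_nil hpre
  rw [PySem.List.pyGet?_zero_cons, PySem.List.pyGet?_neg_one,
      List.getLast?_eq_some_getLast (l := x :: t) (List.cons_ne_nil x t)]
  simp only
  rw [go_eq_chain (x :: t) x.2 (x :: t).length (le_refl _), List.take_length]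
  exact foldA_chain _ _ _ _
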